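-- pv_equiv track=rewrite | github.com/chakibMH/Masters-Graduation-Project | Weighted_Sampling/weightedSampling.py | sort_queries_def
-- ===== SOURCE A (Python) =====
-- def sort_queries_def(new_q_list,queries_def):
--
--     lk = []
--
--     for e in new_q_list :
--         h = e[0]
--         for b in queries_def:
--             x = b.split("@")
--             tag = x[0]
--             if tag == h :
--                 lk.append(b)
--     return lk
-- ===== SOURCE B (Python) =====
-- def sort_queries_def(new_q_list, queries_def):
--     pairs = [(b.split("@")[0], b) for b in queries_def]
--     by_tag = {}
--     for k, b in pairs:
--         by_tag.setdefault(k, []).append(b)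
--     out = []
--     for e in new_q_list:
--         out += by_tag.get(e[0], [])
--     return out
-- ===== Notes on version B (the rewrite author's own statement) =====
-- stated objective: faster
-- what changed: B builds a tag->entries index over queries_def once and answers each query with a single dict lookup, instead of A's rescan of queries_def (with repeated splitting) for every query.
import Mathlib
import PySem

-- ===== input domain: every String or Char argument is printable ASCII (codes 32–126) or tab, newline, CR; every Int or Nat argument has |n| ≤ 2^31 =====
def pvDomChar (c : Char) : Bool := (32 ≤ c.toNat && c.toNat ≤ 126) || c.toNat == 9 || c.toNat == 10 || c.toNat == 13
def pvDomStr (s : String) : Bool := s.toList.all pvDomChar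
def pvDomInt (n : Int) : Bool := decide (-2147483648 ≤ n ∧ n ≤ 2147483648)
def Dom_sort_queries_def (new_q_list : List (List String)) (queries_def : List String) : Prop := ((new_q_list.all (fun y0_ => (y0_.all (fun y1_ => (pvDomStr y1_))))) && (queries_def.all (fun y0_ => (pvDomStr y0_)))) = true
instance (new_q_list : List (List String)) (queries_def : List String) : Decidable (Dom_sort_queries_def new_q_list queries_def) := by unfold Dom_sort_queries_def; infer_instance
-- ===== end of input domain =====

-- B replaces A's rescan of queries_def per query by a tag->entries dict built once (asymptotically faster).


-- ===== PORT A =====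
-- b.split("@")[0]: split? is some (sep ≠ ""), and the split list is never empty, so headD "" is exact
def pvTag (b : String) : String := ((PySem.Str.split? b "@").getD []).headD ""

def sort_queries_def (new_q_list : List (List String)) (queries_def : List String) : List String :=
  new_q_list.foldl (fun lk e =>
    -- h = e[0]; IndexError on empty e is excluded by Pre_, where getD "" is exact
    let h := (PySem.List.pyGet? e 0).getD ""
    queries_def.foldl (fun lk b =>
      let x := (PySem.Str.split? b "@").getD []
      let tag := x.headD ""
      if tag == h then lk ++ [b] else lk) lk) []

-- ===== PORT B =====
def sort_queries_def_alt (new_q_list : List (List String)) (queries_def : List String) : List String :=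
  let pairs := queries_def.map (fun b => (pvTag b, b))
  -- by_tag.setdefault(k, []).append(b): append-in-place = modify k [] (· ++ [b])
  let by_tag := pairs.foldl (fun d p => d.modify p.1 [] (· ++ [p.2])) PySem.Dict.empty
  new_q_list.foldl (fun out e => out ++ by_tag.getD ((PySem.List.pyGet? e 0).getD "") []) []

-- ===== PRECONDITION & SPEC =====
-- Pre_ excludes empty inner lists, on which A's e[0] raises IndexError.
def Pre_sort_queries_def (new_q_list : List (List String)) (queries_def : List String) : Prop :=
  ∀ e ∈ new_q_list, e ≠ []
instance (new_q_list : List (List String)) (queries_def : List String) : Decidable (Pre_sort_queries_def new_q_list queries_def) := by unfold Pre_sort_queries_def; infer_instance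
def pvWitness_sort_queries_def : List (List String) × List String := ([["a"], ["b"]], ["a@1", "b@2", "c@3", "a@4"])

def Spec_sort_queries_def (new_q_list : List (List String)) (queries_def : List String) (out : List String) : Prop := out = sort_queries_def_alt new_q_list queries_def
instance (new_q_list : List (List String)) (queries_def : List String) (out : List String) : Decidable (Spec_sort_queries_def new_q_list queries_def out) := by unfold Spec_sort_queries_def; infer_instance

-- ===== CLAIM (what is proved, stated in full; the proofs are below) =====
def Claim_equal_sort_queries_def : Prop := ∀ (new_q_list : List (List String)) (queries_def : List String), Dom_sort_queries_def new_q_list queries_def → Pre_sort_queries_def new_q_list queries_def → Spec_sort_queries_def new_q_list queries_def (sort_queries_def new_q_list queries_def)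

-- ===== LEMMAS AND PROOFS =====
-- The dict lookup for a key h yields exactly the queries whose tag is h.
theorem pv_lookup_eq_filter (queries_def : List String) (h : String) :
    ((queries_def.map (fun b => (pvTag b, b))).foldl
        (fun d p => d.modify p.1 [] (· ++ [p.2])) PySem.Dict.empty).getD h []
      = queries_def.filter (fun b => pvTag b == h) := by
  rw [PySem.Dict.getD_foldl_modify_append]
  simp [List.filter_map, Function.comp_def]

-- A's inner loop over queries_def appends exactly that filter.
theorem pv_inner_eq_append_filter (queries_def : List String) (h : String) (lk : List String) :
    queries_def.foldl (fun lk b =>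
      let x := (PySem.Str.split? b "@").getD []
      let tag := x.headD ""
      if tag == h then lk ++ [b] else lk) lk
      = lk ++ queries_def.filter (fun b => pvTag b == h) := by
  induction queries_def generalizing lk with
  | nil => simp
  | cons b rest ih =>
      simp only [List.foldl_cons]
      rw [ih, List.filter_cons]
      by_cases hb : ((PySem.Str.split? b "@").getD []).head?.getD "" = h
      · simp [pvTag, hb]
      · simp [pvTag, hb]

-- ===== VERDICT (by name: the statement is the Claim_ definition above) =====
theorem sort_queries_def_spec : Claim_equal_sort_queries_def := by
  intro new_q_list queries_def hdom hpre
  clear hdom hpre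
  unfold Spec_sort_queries_def sort_queries_def sort_queries_def_alt
  induction new_q_list using List.reverseRecOn with
  | nil => rfl
  | append_singleton xs e ih =>
      simp only [List.foldl_append, List.foldl_cons, List.foldl_nil]
      rw [ih, pv_inner_eq_append_filter, pv_lookup_eq_filter]
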